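-- pv_equiv track=rewrite | github.com/cheeseywhiz/www | api/root.py | divide_seconds
-- ===== SOURCE A (Python) =====
-- import functools
--
-- def divide_seconds(seconds, blocks=[1, 60, 60, 24, 365]):
--     divisions = []
--     remainder = seconds
--     block_size_seconds = functools.reduce(lambda x, y: x * y, blocks)
--
--     for block_size in reversed(blocks):
--         division = remainder // block_size_seconds
--         remainder -= division * block_size_seconds
--         divisions.append(division)
--         block_size_seconds //= block_size
--
--     divisions.reverse()
--     return divisions
-- ===== SOURCE B (Python) =====
-- def divide_seconds(seconds, blocks=[1, 60, 60, 24, 365]):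
--     # Single forward pass: each digit is computed directly from `seconds` via the
--     # cumulative place value, instead of reducing a running remainder top-down.
--     place = blocks[0]
--     divisions = []
--     for block in blocks[1:]:
--         nxt = place * block
--         divisions.append((seconds % nxt) // place)
--         place = nxt
--     divisions.append(seconds // place)
--     return divisions
-- ===== Notes on version B (the rewrite author's own statement) =====
-- stated objective: simpler
-- what changed: B makes one forward pass with a cumulative place value and reads each digit directly off `seconds` as (seconds % next_place) // place, instead of A's pre-computed total product, reversed iteration over a mutated remainder, and final list reversal.
import Mathlib
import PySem

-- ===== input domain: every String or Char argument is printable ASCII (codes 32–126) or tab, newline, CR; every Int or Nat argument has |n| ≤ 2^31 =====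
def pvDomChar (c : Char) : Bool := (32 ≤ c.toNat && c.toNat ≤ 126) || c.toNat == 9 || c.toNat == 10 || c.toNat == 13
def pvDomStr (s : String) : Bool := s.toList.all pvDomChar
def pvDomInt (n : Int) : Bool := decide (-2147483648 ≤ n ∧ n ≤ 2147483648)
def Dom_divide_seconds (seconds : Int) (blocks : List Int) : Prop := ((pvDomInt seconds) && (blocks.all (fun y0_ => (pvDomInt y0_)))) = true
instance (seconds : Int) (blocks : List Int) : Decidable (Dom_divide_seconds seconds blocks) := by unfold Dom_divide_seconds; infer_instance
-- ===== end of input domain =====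

-- B replaces A's total-product/reversed-loop/mutable-remainder/final-reverse scheme by one
-- forward pass with a cumulative place value, reading each digit directly off `seconds`
-- (objective: simpler).

-- ===== PORT A =====
-- A: divisions=[]; remainder=seconds; bss=reduce(*, blocks); for block_size in reversed(blocks):
--    division = remainder // bss; remainder -= division*bss; divisions.append(division); bss //= block_size
-- then divisions.reverse().
def divide_seconds (seconds : Int) (blocks : List Int) : List Int :=
  match blocks with
  | [] => []  -- functools.reduce raises TypeError on an empty sequence (excluded by Pre_)
  | b :: bs =>
    let bss0 := bs.foldl (· * ·) b
    let fin := (b :: bs).reverse.foldl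
      (fun (st : List Int × Int × Int) block_size =>
        let division := PySem.Int.floordiv st.2.1 st.2.2
        (st.1 ++ [division], st.2.1 - division * st.2.2, PySem.Int.floordiv st.2.2 block_size))
      ([], seconds, bss0)
    fin.1.reverse

-- ===== PORT B =====
-- B: place = blocks[0]; for block in blocks[1:]: nxt = place*block;
--    divisions.append((seconds % nxt) // place); place = nxt;  then divisions.append(seconds // place).
def divide_seconds_alt (seconds : Int) (blocks : List Int) : List Int :=
  match blocks with
  | [] => []  -- blocks[0] raises IndexError on an empty list (excluded by Pre_)
  | b0 :: rest =>
    let fin := rest.foldl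
      (fun (st : Int × List Int) block =>
        let nxt := st.1 * block
        (nxt, st.2 ++ [PySem.Int.floordiv (PySem.Int.mod seconds nxt) st.1]))
      (b0, [])
    fin.2 ++ [PySem.Int.floordiv seconds fin.1]

-- ===== PRECONDITION & SPEC =====
-- Pre_ excludes exactly the inputs where A raises: the empty list (TypeError from reduce)
-- and lists containing 0 (ZeroDivisionError from // by a zero product).
def Pre_divide_seconds (seconds : Int) (blocks : List Int) : Prop :=
  blocks ≠ [] ∧ ∀ b ∈ blocks, b ≠ 0
instance (seconds : Int) (blocks : List Int) : Decidable (Pre_divide_seconds seconds blocks) := by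
  unfold Pre_divide_seconds; infer_instance

def pvWitness_divide_seconds : Int × List Int := (90061, [1, 60, 60, 24, 365])

def Spec_divide_seconds (seconds : Int) (blocks : List Int) (out : List Int) : Prop := out = divide_seconds_alt seconds blocks
instance (seconds : Int) (blocks : List Int) (out : List Int) : Decidable (Spec_divide_seconds seconds blocks out) := by unfold Spec_divide_seconds; infer_instance

-- ===== CLAIM (what is proved, stated in full; the proofs are below) =====
def Claim_equal_divide_seconds : Prop := ∀ (seconds : Int) (blocks : List Int), Dom_divide_seconds seconds blocks → Pre_divide_seconds seconds blocks → Spec_divide_seconds seconds blocks (divide_seconds seconds blocks)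

-- ===== LEMMAS AND PROOFS =====

-- Recursive form of A's loop body (division list it appends, in processed order).
def aL (r bss : Int) : List Int → List Int
  | [] => []
  | bk :: rest =>
    let d := Int.fdiv r bss
    d :: aL (r - d * bss) (Int.fdiv bss bk) rest

-- Recursive form of B's loop body.
def bL (s place : Int) : List Int → List Int
  | [] => []
  | b :: rest => Int.fdiv (Int.fmod s (place * b)) place :: bL s (place * b) rest

-- B's whole result as a function of the block list.
def bForm (s : Int) : List Int → List Int
  | [] => []
  | b0 :: rest => bL s b0 rest ++ [Int.fdiv s ((b0 :: rest).prod)]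

theorem foldl_mul_eq_prod (b : Int) (bs : List Int) :
    bs.foldl (· * ·) b = b * bs.prod := by
  induction bs generalizing b with
  | nil => simp
  | cons x t ih => simp [List.foldl_cons, ih (b * x), List.prod_cons, mul_assoc]

theorem aFold (l : List Int) (acc : List Int) (r bss : Int) :
    (l.foldl
      (fun (st : List Int × Int × Int) block_size =>
        let division := PySem.Int.floordiv st.2.1 st.2.2
        (st.1 ++ [division], st.2.1 - division * st.2.2, PySem.Int.floordiv st.2.2 block_size))
      (acc, r, bss)).1 = acc ++ aL r bss l := by
  induction l generalizing acc r bss with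
  | nil => simp [aL]
  | cons x t ih =>
    exact (ih (acc ++ [PySem.Int.floordiv r bss]) (r - PySem.Int.floordiv r bss * bss)
      (PySem.Int.floordiv bss x)).trans (by simp [aL, PySem.Int.floordiv, List.append_assoc])

theorem bFold (s : Int) (l : List Int) (p : Int) (acc : List Int) :
    l.foldl
      (fun (st : Int × List Int) block =>
        let nxt := st.1 * block
        (nxt, st.2 ++ [PySem.Int.floordiv (PySem.Int.mod s nxt) st.1]))
      (p, acc) = (p * l.prod, acc ++ bL s p l) := by
  induction l generalizing p acc with
  | nil => simp [bL]
  | cons x t ih =>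
    exact (ih (p * x) (acc ++ [PySem.Int.floordiv (PySem.Int.mod s (p * x)) p])).trans
      (by simp [bL, PySem.Int.floordiv, PySem.Int.mod, List.prod_cons, mul_assoc, List.append_assoc])

theorem bL_fmod (s Q : Int) : ∀ (l : List Int) (p : Int), p * l.prod ∣ Q →
    bL (Int.fmod s Q) p l = bL s p l := by
  intro l
  induction l with
  | nil => intro p _; rfl
  | cons b t ih =>
    intro p hdvd
    have hassoc : p * (b :: t).prod = p * b * t.prod := by
      simp [List.prod_cons, mul_assoc]
    have h1 : p * b ∣ Q := dvd_trans ⟨t.prod, by rw [hassoc]⟩ hdvd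
    have h2 : p * b * t.prod ∣ Q := by rw [← hassoc]; exact hdvd
    simp only [bL]
    rw [Int.fmod_fmod_of_dvd s h1, ih (p * b) h2]

theorem bL_append_last (s x : Int) : ∀ (l : List Int) (p : Int),
    bL s p (l ++ [x]) =
      bL s p l ++ [Int.fdiv (Int.fmod s (p * l.prod * x)) (p * l.prod)] := by
  intro l
  induction l with
  | nil => intro p; simp [bL]
  | cons b t ih =>
    intro p
    simp only [List.cons_append, bL, ih (p * b), List.prod_cons]
    simp only [← mul_assoc]

theorem main_equiv : ∀ (bs : List Int), (∀ b ∈ bs, b ≠ 0) → ∀ s : Int,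
    (aL s bs.prod bs.reverse).reverse = bForm s bs := by
  intro bs
  induction bs using List.reverseRecOn with
  | nil => intro _ s; rfl
  | append_singleton l x ih =>
    intro hnz s
    have hx : x ≠ 0 := hnz x (by simp)
    have hQ : (l ++ [x]).prod = l.prod * x := by simp
    cases l with
    | nil =>
      simp [aL, bForm, bL]
    | cons b0 rest =>
      have hl : ∀ b ∈ b0 :: rest, b ≠ 0 := fun b hb => hnz b (by simp only [List.cons_append]; exact List.mem_append_left _ hb)
      set Q := ((b0 :: rest) ++ [x]).prod with hQdef
      have hQ' : Q = (b0 :: rest).prod * x := hQ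
      -- unfold one step of aL on the reversed list
      have hrev : ((b0 :: rest) ++ [x]).reverse = x :: (b0 :: rest).reverse := by simp
      rw [hrev]
      have hfd : Int.fdiv Q x = (b0 :: rest).prod := by
        rw [hQ']; exact Int.mul_fdiv_cancel _ hx
      have hrem : s - Int.fdiv s Q * Q = Int.fmod s Q := by
        rw [Int.fmod_def]; ring
      simp only [aL, hfd, hrem, List.reverse_cons]
      have ih' := ih hl (Int.fmod s Q)
      simp only [List.reverse_cons] at ih'
      rw [ih']
      -- now: bForm (fmod s Q) (b0::rest) ++ [fdiv s Q] = bForm s (b0::rest ++ [x])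
      show bForm (Int.fmod s Q) (b0 :: rest) ++ [Int.fdiv s Q] = bForm s ((b0 :: rest) ++ [x])
      simp only [bForm, List.cons_append]
      rw [bL_append_last s x rest b0]
      have hdvd : b0 * rest.prod ∣ Q := by
        rw [hQ', List.prod_cons]; exact ⟨x, by ring⟩
      rw [bL_fmod s Q rest b0 hdvd]
      have hQ2 : Q = b0 * rest.prod * x := by
        rw [hQ', List.prod_cons]
      rw [hQ2]
      simp [List.prod_cons, mul_assoc]

-- ===== VERDICT (by name: the statement is the Claim_ definition above) =====
theorem divide_seconds_spec : Claim_equal_divide_seconds := by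
  intro seconds blocks _hDom hPre
  unfold Spec_divide_seconds
  obtain ⟨hne, hnz⟩ := hPre
  cases blocks with
  | nil => exact absurd rfl hne
  | cons b0 rest =>
    show divide_seconds seconds (b0 :: rest) = divide_seconds_alt seconds (b0 :: rest)
    unfold divide_seconds divide_seconds_alt
    simp only []
    rw [aFold, bFold]
    have h1 : rest.foldl (· * ·) b0 = (b0 :: rest).prod := by
      rw [foldl_mul_eq_prod]; simp [List.prod_cons]
    rw [h1]
    have h2 := main_equiv (b0 :: rest) hnz seconds
    simp only [List.nil_append] at *
    rw [h2]
    simp [bForm, List.prod_cons, PySem.Int.floordiv]
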